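-- pv_equiv track=rewrite | github.com/David-5-5/tutorial | python/leecode/algo/algo2209.py | minimumWhiteTiles
-- ===== SOURCE A (Python) =====
-- from functools import lru_cache
--
-- def minimumWhiteTiles(floor: str, numCarpets: int, carpetLen: int) -> int:
--     n = len(floor)
--     whites = [0] * n
--
--     for i in range(n):
--         whites[i] = int(floor[i]) + (whites[i-1] if i else 0)
--
--     if whites[i] <= numCarpets: return 0
--
--     @lru_cache(maxsize = None)
--     def whiteTiles(cur, leftCarpets) -> int:
--         if cur <= carpetLen * leftCarpets: return 0
--         if leftCarpets == 0: return whites[cur-1]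
--         minT = whiteTiles(cur-carpetLen, leftCarpets-1)
--         return min(minT, whiteTiles(cur-1, leftCarpets) + int(floor[cur-1]))
--
--     return whiteTiles(n, numCarpets)
-- ===== SOURCE B (Python) =====
-- def minimumWhiteTiles(floor: str, numCarpets: int, carpetLen: int) -> int:
--     n = len(floor)
--     whites = [0] * n
--     for i in range(n):
--         whites[i] = int(floor[i]) + (whites[i - 1] if i else 0)
--
--     if whites[n - 1] <= numCarpets:
--         return 0
--     if n <= numCarpets * carpetLen:
--         return 0
--
--     # bottom-up DP: prev[cur] = min white tiles visible among the first cur tiles using j carpets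
--     prev = [0] + whites  # j = 0: all whites of the prefix are visible
--     for j in range(1, numCarpets + 1):
--         row = [0]
--         for cur in range(1, n + 1):
--             if cur <= carpetLen * j:
--                 row.append(0)
--             else:
--                 row.append(min(prev[cur - carpetLen], row[cur - 1] + int(floor[cur - 1])))
--         prev = row
--     return prev[n]
-- ===== Notes on version B (the rewrite author's own statement) =====
-- stated objective: alternative
-- what changed: Replaces the top-down lru_cache recursion over (cur, leftCarpets) with an explicit bottom-up DP that fills the table row by row (one row per carpet count) and returns the last cell, keeping the same prefix-sum whites and early zero checks.
import Mathlib
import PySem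

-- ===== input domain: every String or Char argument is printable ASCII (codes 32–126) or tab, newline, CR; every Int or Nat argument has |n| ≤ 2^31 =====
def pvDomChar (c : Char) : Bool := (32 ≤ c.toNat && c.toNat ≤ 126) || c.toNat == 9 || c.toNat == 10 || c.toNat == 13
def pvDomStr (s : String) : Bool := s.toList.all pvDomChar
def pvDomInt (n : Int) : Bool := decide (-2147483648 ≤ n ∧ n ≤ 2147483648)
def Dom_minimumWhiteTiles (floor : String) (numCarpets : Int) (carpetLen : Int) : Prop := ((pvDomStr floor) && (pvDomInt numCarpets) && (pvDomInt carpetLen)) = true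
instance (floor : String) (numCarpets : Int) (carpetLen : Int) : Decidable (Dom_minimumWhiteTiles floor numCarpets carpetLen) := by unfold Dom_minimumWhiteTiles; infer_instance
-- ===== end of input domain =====

-- B replaces A's top-down lru_cache recursion by an explicit bottom-up DP table filled row by
-- row (same recurrence, same prefix-sum whites); equivalence of the return values is proved on Pre_.

-- ===== PORT A =====
-- int(floor[i]) for one character: exact where Python returns (digit chars, inside Pre_); 0 where Python raises
def pvCharInt (o : Option Char) : Int := match o with
  | some c => (PySem.Int.ofChars? [c]).getD 0
  | none => 0

-- the `whites` prefix-sum loop, shared verbatim by Source A and Source B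
def pvWhites (fl : List Char) : List Int :=
  (PySem.List.pyRange 0 (fl.length : Int) 1).foldl
    (fun w i => PySem.List.pySetD w i
      (pvCharInt (PySem.List.pyGet? fl i) + (if i ≠ 0 then PySem.List.pyGetD w (i - 1) 0 else 0)))
    (List.replicate fl.length 0)

-- the memoized recursion `whiteTiles`, as plain recursion with a fuel bound (fuel suffices on Pre_)
def whiteTilesA (fl : List Char) (whites : List Int) (carpetLen : Int) : Nat → Int → Int → Int
  | 0, _, _ => 0
  | fuel + 1, cur, left =>
    if cur ≤ carpetLen * left then 0
    else if left = 0 then PySem.List.pyGetD whites (cur - 1) 0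
    else
      let minT := whiteTilesA fl whites carpetLen fuel (cur - carpetLen) (left - 1)
      min minT (whiteTilesA fl whites carpetLen fuel (cur - 1) left + pvCharInt (PySem.List.pyGet? fl (cur - 1)))

def minimumWhiteTiles (floor : String) (numCarpets : Int) (carpetLen : Int) : Int :=
  let fl := floor.toList
  let n : Int := (fl.length : Int)
  let whites := pvWhites fl
  if PySem.List.pyGetD whites (n - 1) 0 ≤ numCarpets then 0
  else whiteTilesA fl whites carpetLen (fl.length + numCarpets.toNat + 1) n numCarpets

-- ===== PORT B =====
def minimumWhiteTiles_alt (floor : String) (numCarpets : Int) (carpetLen : Int) : Int :=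
  let fl := floor.toList
  let n : Int := (fl.length : Int)
  let whites := pvWhites fl
  if PySem.List.pyGetD whites (n - 1) 0 ≤ numCarpets then 0
  else if n ≤ numCarpets * carpetLen then 0
  else
    let prev0 : List Int := 0 :: whites
    let final := (PySem.List.pyRange 1 (numCarpets + 1) 1).foldl
      (fun prev j =>
        (PySem.List.pyRange 1 (n + 1) 1).foldl
          (fun row cur =>
            row ++ [if cur ≤ carpetLen * j then 0
                    else min (PySem.List.pyGetD prev (cur - carpetLen) 0)
                             (PySem.List.pyGetD row (cur - 1) 0 + pvCharInt (PySem.List.pyGet? fl (cur - 1)))])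
          [0]) prev0
    PySem.List.pyGetD final n 0

-- ===== PRECONDITION & SPEC =====
-- Pre_ excludes exactly the inputs where the Python A raises: the empty string (UnboundLocalError),
-- non-digit characters (ValueError from int), and a negative numCarpets or carpetLen that the
-- recursion actually reaches (IndexError / unbounded recursion) — i.e. unless one of the
-- early-zero conditions (white total ≤ numCarpets, or n ≤ carpetLen*numCarpets, or numCarpets = 0) holds.
def Pre_minimumWhiteTiles (floor : String) (numCarpets : Int) (carpetLen : Int) : Prop :=
  PySem.Chars.strIsdigit floor.toList = true ∧
    ((floor.toList.map (fun c => pvCharInt (some c))).sum ≤ numCarpets ∨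
     (floor.toList.length : Int) ≤ carpetLen * numCarpets ∨
     numCarpets = 0 ∨
     (0 ≤ numCarpets ∧ 0 ≤ carpetLen))
instance (floor : String) (numCarpets : Int) (carpetLen : Int) : Decidable (Pre_minimumWhiteTiles floor numCarpets carpetLen) := by unfold Pre_minimumWhiteTiles; infer_instance

def pvWitness_minimumWhiteTiles : String × Int × Int := ("11", 1, 2)

def Spec_minimumWhiteTiles (floor : String) (numCarpets : Int) (carpetLen : Int) (out : Int) : Prop := out = minimumWhiteTiles_alt floor numCarpets carpetLen
instance (floor : String) (numCarpets : Int) (carpetLen : Int) (out : Int) : Decidable (Spec_minimumWhiteTiles floor numCarpets carpetLen out) := by unfold Spec_minimumWhiteTiles; infer_instance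

-- ===== CLAIM (what is proved, stated in full; the proofs are below) =====
def Claim_equal_minimumWhiteTiles : Prop := ∀ (floor : String) (numCarpets : Int) (carpetLen : Int), Dom_minimumWhiteTiles floor numCarpets carpetLen → Pre_minimumWhiteTiles floor numCarpets carpetLen → Spec_minimumWhiteTiles floor numCarpets carpetLen (minimumWhiteTiles floor numCarpets carpetLen)

-- ===== LEMMAS AND PROOFS =====

-- the common mathematical recurrence both ports compute (total: lexicographic on (carpets, cur))
def pvW (whites : List Int) (fl : List Char) (cL : Nat) : Nat → Nat → Int
  | cur, j =>
    if _h : (cur : Int) ≤ (cL : Int) * (j : Int) then 0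
    else if hj : j = 0 then PySem.List.pyGetD whites ((cur : Int) - 1) 0
    else
      min (pvW whites fl cL (cur - cL) (j - 1))
          (pvW whites fl cL (cur - 1) j + pvCharInt (PySem.List.pyGet? fl ((cur : Int) - 1)))
  termination_by cur j => (j, cur)
  decreasing_by
  · exact Prod.Lex.left _ _ (by omega)
  · have h0 : (0:Int) ≤ (cL : Int) * (j : Int) := by positivity
    exact Prod.Lex.right _ (by omega)

def pvS (fl : List Char) (k : Nat) : Int := ((fl.take k).map (fun c => pvCharInt (some c))).sum

theorem pvS_succ (fl : List Char) (k : Nat) (hk : k < fl.length) :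
    pvS fl (k + 1) = pvS fl k + pvCharInt (some fl[k]) := by
  unfold pvS
  rw [List.take_add_one, List.map_append, List.sum_append]
  simp [List.getElem?_eq_getElem hk]

theorem pvWhites_eq (fl : List Char) :
    pvWhites fl = (List.range fl.length).map (fun i => pvS fl (i + 1)) := by
  unfold pvWhites
  rw [PySem.List.pyRange_zero_nat, List.foldl_map]
  have key : ∀ m, m ≤ fl.length →
      (List.range m).foldl
        (fun w (i : Nat) => PySem.List.pySetD w (i : Int)
          (pvCharInt (PySem.List.pyGet? fl (i : Int)) + (if (i : Int) ≠ 0 then PySem.List.pyGetD w ((i : Int) - 1) 0 else 0)))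
        (List.replicate fl.length 0)
      = (List.range fl.length).map (fun i => if i < m then pvS fl (i + 1) else 0) := by
    intro m
    induction m with
    | zero =>
      intro _
      apply List.ext_getElem
      · simp
      · intro i h1 h2
        simp
    | succ m ih =>
      intro hm
      rw [List.range_succ, List.foldl_append, ih (by omega), List.foldl_cons, List.foldl_nil]
      rw [PySem.List.pySetD_natCast]
      apply List.ext_getElem
      · simp
      · intro i h1 h2
        rw [List.getElem_set]
        by_cases him : m = i
        · subst him
          have hmlen : m < fl.length := by omega
          rw [if_pos rfl]
          rw [PySem.List.pyGet?_natCast, List.getElem?_eq_getElem hmlen]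
          simp only [List.getElem_map, List.getElem_range]
          rw [show (if m < m + 1 then pvS fl (m + 1) else 0) = pvS fl (m + 1) from if_pos (by omega)]
          rw [pvS_succ fl m hmlen]
          match m with
          | 0 => rw [if_neg (by simp)]; simp [pvS]
          | Nat.succ k =>
            rw [if_pos (by push_cast; omega)]
            have e1 : ((k + 1 : Nat) : Int) - 1 = ((k : Nat) : Int) := by push_cast; omega
            rw [e1, PySem.List.pyGetD_natCast, PySem.List.getD_map_range _ _ _ _ (by omega)]
            rw [if_pos (by omega)]
            ring
        · rw [if_neg him]
          simp only [List.getElem_map, List.getElem_range]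
          by_cases hi : i < m
          · rw [if_pos hi, if_pos (by omega)]
          · rw [if_neg hi, if_neg (by omega)]
  rw [key fl.length le_rfl]
  apply List.ext_getElem
  · simp
  · intro i h1 h2
    simp only [List.getElem_map, List.getElem_range] at *
    rw [if_pos (by simp at h1; omega)]

theorem foldl_pySetD_length (f : List Int → Int → List Int)
    (hf : ∀ w i, (f w i).length = w.length) :
    ∀ (l : List Int) (w : List Int), (l.foldl f w).length = w.length := by
  intro l
  induction l with
  | nil => intro w; rfl
  | cons x xs ih => intro w; simp [List.foldl, ih, hf]

theorem length_pvWhites (fl : List Char) : (pvWhites fl).length = fl.length := by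
  unfold pvWhites
  rw [foldl_pySetD_length]
  · simp
  · intro w i; exact PySem.List.length_pySetD w i _

theorem whiteTilesA_eq_pvW (fl : List Char) (whites : List Int) (cL : Nat) :
    ∀ (fuel cur j : Nat), cur + j < fuel →
      whiteTilesA fl whites (cL : Int) fuel (cur : Int) (j : Int) = pvW whites fl cL cur j := by
  intro fuel
  induction fuel with
  | zero => intro cur j h; omega
  | succ fuel ih =>
    intro cur j h
    rw [whiteTilesA, pvW]
    by_cases hg : (cur : Int) ≤ (cL : Int) * (j : Int)
    · rw [if_pos hg, dif_pos hg]
    · have h0 : (0:Int) ≤ (cL : Int) * (j : Int) := by positivity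
      have hcur1 : 1 ≤ cur := by omega
      rw [if_neg hg, dif_neg hg]
      by_cases hj0 : j = 0
      · subst hj0; simp
      · have hjj : (j : Int) ≠ 0 := by exact_mod_cast hj0
        rw [if_neg hjj, dif_neg hj0]
        have hcl : cL ≤ cur := by
          have h1 : (cL : Int) * 1 ≤ (cL : Int) * (j : Int) :=
            mul_le_mul_of_nonneg_left (by exact_mod_cast Nat.one_le_iff_ne_zero.mpr hj0) (by positivity)
          omega
        have e1 : (cur : Int) - (cL : Int) = ((cur - cL : Nat) : Int) := by omega
        have e2 : (cur : Int) - 1 = ((cur - 1 : Nat) : Int) := by omega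
        have e3 : (j : Int) - 1 = ((j - 1 : Nat) : Int) := by omega
        simp only [e1, e2, e3]
        rw [ih _ _ (by omega), ih _ _ (by omega)]
theorem inner_fold_eq (fl : List Char) (whites : List Int) (cL : Nat) (j : Nat) (hj : 1 ≤ j) (n : Nat) :
    ∀ m, m ≤ n →
      (PySem.List.pyRange 1 ((m : Int) + 1) 1).foldl
        (fun row cur =>
          row ++ [if cur ≤ (cL : Int) * (j : Int) then 0
                  else min (PySem.List.pyGetD ((List.range (n + 1)).map (fun c => pvW whites fl cL c (j - 1))) (cur - (cL : Int)) 0)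
                           (PySem.List.pyGetD row (cur - 1) 0 + pvCharInt (PySem.List.pyGet? fl (cur - 1)))])
        [0]
      = (List.range (m + 1)).map (fun c => pvW whites fl cL c j) := by
  intro m
  induction m with
  | zero =>
    intro _
    rw [PySem.List.pyRange_one_eq_nil (by omega)]
    have : pvW whites fl cL 0 j = 0 := by
      rw [pvW]; rw [dif_pos (by positivity)]
    simp [this]
  | succ m ih =>
    intro hmn
    have hsplit : PySem.List.pyRange 1 (((m + 1 : Nat) : Int) + 1) 1
        = PySem.List.pyRange 1 ((m : Int) + 1) 1 ++ [(m : Int) + 1] := by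
      push_cast
      exact PySem.List.pyRange_one_succ_right (by omega)
    rw [hsplit, List.foldl_append, ih (by omega)]
    rw [List.foldl_cons, List.foldl_nil]
    have hval : (if ((m : Int) + 1) ≤ (cL : Int) * (j : Int) then 0
        else min (PySem.List.pyGetD ((List.range (n + 1)).map (fun c => pvW whites fl cL c (j - 1))) (((m : Int) + 1) - (cL : Int)) 0)
                 (PySem.List.pyGetD ((List.range (m + 1)).map (fun c => pvW whites fl cL c j)) (((m : Int) + 1) - 1) 0
                   + pvCharInt (PySem.List.pyGet? fl (((m : Int) + 1) - 1))))
        = pvW whites fl cL (m + 1) j := by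
      by_cases hg : ((m : Int) + 1) ≤ (cL : Int) * (j : Int)
      · rw [if_pos hg]
        rw [pvW, dif_pos (by push_cast; omega)]
      · rw [if_neg hg]
        have hjj : j ≠ 0 := by omega
        have hcl : cL ≤ m + 1 := by
          have h1 : (cL : Int) * 1 ≤ (cL : Int) * (j : Int) :=
            mul_le_mul_of_nonneg_left (by exact_mod_cast hj) (by positivity)
          omega
        rw [pvW, dif_neg (by push_cast; omega), dif_neg hjj]
        have e1 : ((m : Int) + 1) - (cL : Int) = ((m + 1 - cL : Nat) : Int) := by omega
        have e2 : ((m : Int) + 1) - 1 = ((m : Nat) : Int) := by omega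
        have e3 : ((m + 1 : Nat) : Int) - 1 = ((m : Nat) : Int) := by push_cast; omega
        rw [e1, e2, e3, PySem.List.pyGetD_natCast, PySem.List.pyGetD_natCast,
          PySem.List.getD_map_range _ _ _ _ (by omega),
          PySem.List.getD_map_range _ _ _ _ (by omega)]
        simp
    rw [hval,
      show [pvW whites fl cL (m + 1) j] = List.map (fun c => pvW whites fl cL c j) [m + 1] from rfl,
      ← List.map_append, ← List.range_succ]
theorem outer_fold_eq (fl : List Char) (whites : List Int) (cL : Nat) (n : Nat) (hn : whites.length = n) :
    ∀ (t : Nat),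
      (PySem.List.pyRange 1 ((t : Int) + 1) 1).foldl
        (fun prev jj =>
          (PySem.List.pyRange 1 ((n : Int) + 1) 1).foldl
            (fun row cur =>
              row ++ [if cur ≤ (cL : Int) * jj then 0
                      else min (PySem.List.pyGetD prev (cur - (cL : Int)) 0)
                               (PySem.List.pyGetD row (cur - 1) 0 + pvCharInt (PySem.List.pyGet? fl (cur - 1)))])
            [0]) (0 :: whites)
      = (List.range (n + 1)).map (fun c => pvW whites fl cL c t) := by
  intro t
  induction t with
  | zero =>
    have h0 : PySem.List.pyRange 1 (((0 : Nat) : Int) + 1) 1 = [] :=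
      PySem.List.pyRange_one_eq_nil (by norm_num)
    rw [h0, List.foldl_nil]
    apply List.ext_getElem
    · simp [hn]
    · intro i h1 h2
      rw [List.getElem_map, List.getElem_range]
      match i with
      | 0 =>
        rw [pvW, dif_pos (by simp)]
        rfl
      | Nat.succ k =>
        rw [pvW, dif_neg (by push_cast; omega)]
        rw [dif_pos rfl]
        have ek : ((k + 1 : Nat) : Int) - 1 = ((k : Nat) : Int) := by push_cast; omega
        rw [ek, PySem.List.pyGetD_natCast]
        simp at h1
        rw [List.getElem_cons_succ, List.getD_eq_getElem _ _ (by omega)]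
  | succ t ih =>
    have hsplit : PySem.List.pyRange 1 (((t + 1 : Nat) : Int) + 1) 1
        = PySem.List.pyRange 1 ((t : Int) + 1) 1 ++ [(t : Int) + 1] := by
      push_cast
      exact PySem.List.pyRange_one_succ_right (by omega)
    rw [hsplit, List.foldl_append, ih, List.foldl_cons, List.foldl_nil]
    have h := inner_fold_eq fl whites cL (t + 1) (by omega) n n le_rfl
    have ec : ((t + 1 : Nat) : Int) = (t : Int) + 1 := by push_cast; ring
    rw [ec] at h
    simpa using h
theorem whiteTilesA_succ (fl : List Char) (whites : List Int) (carpetLen : Int)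
    (fuel : Nat) (cur left : Int) :
    whiteTilesA fl whites carpetLen (fuel + 1) cur left
      = if cur ≤ carpetLen * left then 0
        else if left = 0 then PySem.List.pyGetD whites (cur - 1) 0
        else min (whiteTilesA fl whites carpetLen fuel (cur - carpetLen) (left - 1))
                 (whiteTilesA fl whites carpetLen fuel (cur - 1) left
                   + pvCharInt (PySem.List.pyGet? fl (cur - 1))) := rfl

theorem minimumWhiteTiles_spec : Claim_equal_minimumWhiteTiles := by
  intro floor numCarpets carpetLen _hdom hpre
  obtain ⟨hdig, hcases⟩ := hpre
  have hne : floor.toList ≠ [] := by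
    unfold PySem.Chars.strIsdigit at hdig
    intro he; rw [he] at hdig; simp at hdig
  unfold Spec_minimumWhiteTiles minimumWhiteTiles minimumWhiteTiles_alt
  simp only []
  set fl := floor.toList with hfl
  set whites := pvWhites fl with hw
  have hlen : whites.length = fl.length := length_pvWhites fl
  have hn1 : 1 ≤ fl.length := List.length_pos_iff.mpr hne
  have hsum : PySem.List.pyGetD whites ((fl.length : Int) - 1) 0
      = (fl.map (fun c => pvCharInt (some c))).sum := by
    rw [hw, pvWhites_eq]
    have e : ((fl.length : Int) - 1) = ((fl.length - 1 : Nat) : Int) := by omega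
    rw [e, PySem.List.pyGetD_natCast, PySem.List.getD_map_range _ _ _ _ (by omega)]
    rw [show fl.length - 1 + 1 = fl.length from by omega]
    unfold pvS
    rw [List.take_length]
  by_cases h1 : PySem.List.pyGetD whites ((fl.length : Int) - 1) 0 ≤ numCarpets
  · rw [if_pos h1, if_pos h1]
  · rw [if_neg h1, if_neg h1]
    by_cases h2 : (fl.length : Int) ≤ numCarpets * carpetLen
    · rw [if_pos h2, whiteTilesA_succ, if_pos (by rw [mul_comm] at h2; exact h2)]
    · rw [if_neg h2]
      rcases hcases with hs | hc2 | hKz | ⟨hK0, hcl⟩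
      · exact absurd (by rw [hsum]; exact hs) h1
      · exact absurd (by rw [mul_comm] at hc2; exact hc2) h2
      · -- numCarpets = 0: no carpet is placed; both sides are the total white count
        subst hKz
        rw [show (0 : Int).toNat = 0 from rfl, whiteTilesA_succ]
        rw [mul_zero, if_neg (by omega), if_pos rfl]
        rw [show PySem.List.pyRange 1 ((0 : Int) + 1) 1 = [] from
          PySem.List.pyRange_one_eq_nil (by norm_num), List.foldl_nil]
        obtain ⟨m, hm⟩ : ∃ m, fl.length = m + 1 := ⟨fl.length - 1, by omega⟩
        rw [hm]
        have e1 : ((m + 1 : Nat) : Int) - 1 = ((m : Nat) : Int) := by push_cast; omega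
        rw [e1, PySem.List.pyGetD_natCast, PySem.List.pyGetD_natCast, List.getD_cons_succ]
      · -- 0 ≤ numCarpets and 0 ≤ carpetLen: the DP table equals the recursion
        have hclc : ((carpetLen.toNat : Nat) : Int) = carpetLen := Int.toNat_of_nonneg hcl
        have hKc : ((numCarpets.toNat : Nat) : Int) = numCarpets := Int.toNat_of_nonneg hK0
        rw [← hclc, ← hKc]
        rw [whiteTilesA_eq_pvW fl whites carpetLen.toNat _ fl.length numCarpets.toNat (by omega)]
        rw [outer_fold_eq fl whites carpetLen.toNat fl.length hlen numCarpets.toNat]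
        rw [PySem.List.pyGetD_natCast,
          PySem.List.getD_map_range _ _ _ _ (by omega)]
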